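-- pv_equiv track=rewrite | github.com/yasinbashar/INS_LAB | lab_3/task7/compare.py | count_same_bits
-- ===== SOURCE A (Python) =====
-- def hex_to_binary(hex_string):
--     return bin(int(hex_string, 16))[2:].zfill(len(hex_string) * 4)
--
-- def count_same_bits(hex1, hex2):
--     if len(hex1) != len(hex2):
--         raise ValueError("Both hash values must have the same length.")
--
--     bin1 = hex_to_binary(hex1)
--     bin2 = hex_to_binary(hex2)
--     same_bits = sum(1 for a, b in zip(bin1, bin2) if a == b)
--     total_bits = len(bin1)
--     return same_bits, total_bits
-- ===== SOURCE B (Python) =====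
-- def count_same_bits(hex1, hex2):
--     if len(hex1) != len(hex2):
--         raise ValueError("Both hash values must have the same length.")
--     total_bits = 4 * len(hex1)
--     differing = (int(hex1, 16) ^ int(hex2, 16)).bit_count()
--     return total_bits - differing, total_bits
-- ===== Notes on version B (the rewrite author's own statement) =====
-- stated objective: faster
-- what changed: Instead of building two zero-padded binary strings and counting equal characters pairwise, B parses both hex strings to integers once and gets the matching-bit count as total minus the popcount of their XOR ((x ^ y).bit_count()), with no intermediate strings.
-- outside the precondition, e.g. on count_same_bits('-3', '-2'): A returns (7, 8), B returns (6, 8)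
import Mathlib
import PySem

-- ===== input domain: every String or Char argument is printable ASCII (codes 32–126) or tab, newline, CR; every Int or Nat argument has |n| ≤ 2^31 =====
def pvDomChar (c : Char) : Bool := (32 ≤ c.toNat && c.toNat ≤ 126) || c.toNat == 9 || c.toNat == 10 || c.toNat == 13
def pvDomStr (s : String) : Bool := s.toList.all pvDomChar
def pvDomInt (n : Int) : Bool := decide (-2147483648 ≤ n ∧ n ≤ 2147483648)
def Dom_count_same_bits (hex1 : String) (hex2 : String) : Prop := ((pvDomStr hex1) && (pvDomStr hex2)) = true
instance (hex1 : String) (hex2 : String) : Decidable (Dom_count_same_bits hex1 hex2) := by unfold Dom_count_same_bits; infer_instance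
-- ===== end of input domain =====

-- B replaces A's padded-binary-string construction and character zip with one integer
-- XOR and a popcount (objective: faster, constant-factor — no intermediate strings).

-- ===== PORT A =====
-- hex_to_binary(h) = bin(int(h, 16))[2:].zfill(len(h) * 4); none = int() raised ValueError
def hex_to_binary (hex_string : String) : Option (List Char) :=
  (PySem.Int.ofStrBase? hex_string 16).map (fun n =>
    PySem.Chars.zfill (PySem.List.slice (PySem.Int.toBinChars0b n) (some 2) none)
      ((hex_string.length * 4 : Nat) : Int))

def count_same_bits (hex1 : String) (hex2 : String) : Int × Int :=
  if hex1.length ≠ hex2.length then (0, 0)  -- raise ValueError (outside Pre_)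
  else
    match hex_to_binary hex1, hex_to_binary hex2 with
    | some bin1, some bin2 =>
        -- same_bits = sum(1 for a, b in zip(bin1, bin2) if a == b); total_bits = len(bin1)
        ((bin1.zip bin2).foldl (fun acc p => if p.1 == p.2 then acc + 1 else acc) (0 : Int),
         (bin1.length : Int))
    | _, _ => (0, 0)  -- int() raised ValueError (outside Pre_)

-- ===== PORT B =====
def count_same_bits_alt (hex1 : String) (hex2 : String) : Int × Int :=
  if hex1.length ≠ hex2.length then (0, 0)  -- raise ValueError (outside Pre_)
  else
    match PySem.Int.ofStrBase? hex1 16 with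
    | none => (0, 0)  -- int(hex1, 16) raised ValueError (outside Pre_)
    | some x =>
      match PySem.Int.ofStrBase? hex2 16 with
      | none => (0, 0)  -- int(hex2, 16) raised ValueError (outside Pre_)
      | some y =>
        let total : Int := 4 * hex1.length
        -- (x ^ y).bit_count()
        (total - (PySem.Int.bitCount (PySem.Int.bxor x y) : Int), total)

-- ===== PRECONDITION & SPEC =====
-- Pre_ requires equal lengths and that both strings parse as base-16 ints (otherwise A
-- raises ValueError).  Beyond that, Pre_ EXCLUDES one kind of input on which A still
-- returns a value: strings whose parse is NEGATIVE (a '-' sign, e.g. "-3").  There A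
-- zero-pads the characters of bin(x) with the 'b' of the '-0b' prefix still inside and
-- counts character coincidences against that misaligned string, while B counts via
-- Python's bit_count of the (possibly negative) XOR — a negative "hash" is a corner no
-- caller of this digest-comparison function would specify, and neither value is more
-- defensible than the other (they happen to agree on some such pairs, e.g. "-1"/"+1").
-- Nonnegative but padded/prefixed forms ('  ff', '+0ff', '0x10') stay INSIDE Pre_ and are
-- matched.  The two natAbs bounds are true of EVERY base-16 parse of a length-L string
-- (≤ L digits, each < 16) and so exclude nothing further; they are stated explicitly only
-- because PySem exposes no magnitude lemma for ofStrBase?.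
def Pre_count_same_bits (hex1 : String) (hex2 : String) : Prop :=
  hex1.length = hex2.length ∧
  (PySem.Int.ofStrBase? hex1 16).isSome = true ∧
  (PySem.Int.ofStrBase? hex2 16).isSome = true ∧
  0 ≤ (PySem.Int.ofStrBase? hex1 16).getD 0 ∧
  0 ≤ (PySem.Int.ofStrBase? hex2 16).getD 0 ∧
  ((PySem.Int.ofStrBase? hex1 16).getD 0).natAbs < 16 ^ hex1.length ∧
  ((PySem.Int.ofStrBase? hex2 16).getD 0).natAbs < 16 ^ hex2.length
instance (hex1 : String) (hex2 : String) : Decidable (Pre_count_same_bits hex1 hex2) := by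
  unfold Pre_count_same_bits; infer_instance

def pvWitness_count_same_bits : String × String := ("ab", "ff")

def Spec_count_same_bits (hex1 : String) (hex2 : String) (out : Int × Int) : Prop :=
  out = count_same_bits_alt hex1 hex2
instance (hex1 : String) (hex2 : String) (out : Int × Int) : Decidable (Spec_count_same_bits hex1 hex2 out) := by
  unfold Spec_count_same_bits; infer_instance

-- ===== CLAIM (what is proved, stated in full; the proofs are below) =====
def Claim_equal_count_same_bits : Prop := ∀ (hex1 : String) (hex2 : String), Dom_count_same_bits hex1 hex2 → Pre_count_same_bits hex1 hex2 → Spec_count_same_bits hex1 hex2 (count_same_bits hex1 hex2)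

-- ===== LEMMAS AND PROOFS =====

-- the w-bit big-endian binary rendering of n (the value of A's padded string)
def pvPadBin : Nat → Nat → List Char
  | 0, _ => []
  | w + 1, n => pvPadBin w (n / 2) ++ [Nat.digitChar (n % 2)]

-- the digits bin(n) produces for n ≥ 0 (msb first, no padding)
def pvBinChars (n : Nat) : List Char :=
  if h : n < 2 then [Nat.digitChar (n % 2)]
  else pvBinChars (n / 2) ++ [Nat.digitChar (n % 2)]
  decreasing_by omega

lemma pvPadBin_length (w : Nat) : ∀ n, (pvPadBin w n).length = w := by
  induction w with
  | zero => intro n; rfl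
  | succ w ih => intro n; simp [pvPadBin, ih]

lemma pvPadBin_zero (w : Nat) : pvPadBin w 0 = List.replicate w '0' := by
  induction w with
  | zero => rfl
  | succ w ih => rw [List.replicate_succ']; simp [pvPadBin, ih]; rfl

lemma toDigitsCore_two (f : Nat) : ∀ n acc, n < f →
    Nat.toDigitsCore 2 f n acc = pvBinChars n ++ acc := by
  induction f with
  | zero => intro n acc h; omega
  | succ f ih =>
    intro n acc h
    rw [Nat.toDigitsCore]
    by_cases h2 : n / 2 = 0
    · have hn : n < 2 := by omega
      simp only [h2]
      rw [pvBinChars]; simp [hn]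
    · simp only [h2]
      rw [ih (n / 2) _ (by omega)]
      conv_rhs => rw [pvBinChars]
      have hn : ¬ n < 2 := by omega
      simp [hn]

lemma toDigits_two (n : Nat) : Nat.toDigits 2 n = pvBinChars n := by
  unfold Nat.toDigits
  rw [toDigitsCore_two (n + 1) n [] (by omega)]
  simp

lemma pvBinChars_mem (n : Nat) : ∀ c ∈ pvBinChars n, c = '0' ∨ c = '1' := by
  induction n using Nat.strong_induction_on with
  | _ n ih =>
    intro c hc
    rw [pvBinChars] at hc
    have hm : n % 2 = 0 ∨ n % 2 = 1 := by omega
    by_cases h : n < 2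
    · simp [h] at hc
      rcases hm with hm | hm <;> rw [hm] at hc <;> simp [hc, Nat.digitChar]
    · simp [h] at hc
      rcases hc with hc | hc
      · exact ih (n / 2) (by omega) c hc
      · rcases hm with hm | hm <;> rw [hm] at hc <;> simp [hc, Nat.digitChar]

lemma pvBinChars_ne_nil (n : Nat) : pvBinChars n ≠ [] := by
  rw [pvBinChars]
  by_cases h : n < 2 <;> simp [h]

lemma zfill_pad (cs : List Char) (w : Nat) (h0 : cs ≠ [])
    (hd : ∀ c ∈ cs, c = '0' ∨ c = '1') (hl : cs.length ≤ w) :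
    PySem.Chars.zfill cs (w : Int) = List.replicate (w - cs.length) '0' ++ cs := by
  unfold PySem.Chars.zfill
  by_cases hle : (w : Int) ≤ (cs.length : Int)
  · have : w = cs.length := by omega
    simp [this]
  · simp only [hle]
    cases cs with
    | nil => exact absurd rfl h0
    | cons c rest =>
      have hc : c = '0' ∨ c = '1' := hd c (by simp)
      have hns : ¬ (c = '+' ∨ c = '-') := by rcases hc with hc | hc <;> simp [hc]
      simp [hns]

-- left-padding the bin(n) digits to w bits gives the w-bit rendering
lemma pvZP (w : Nat) : ∀ n, n < 2 ^ w → 1 ≤ w →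
    List.replicate (w - (pvBinChars n).length) '0' ++ pvBinChars n = pvPadBin w n := by
  induction w with
  | zero => intro n _ h; omega
  | succ w ih =>
    intro n hn _
    by_cases hw : w = 0
    · subst hw
      have h2 : n < 2 := by simpa using hn
      have hdiv : n / 2 = 0 := by omega
      rw [pvBinChars]
      simp [h2, pvPadBin]
    · by_cases h2 : n < 2
      · -- short number: all-leading-zero case
        have hdiv : n / 2 = 0 := by omega
        rw [pvBinChars, dif_pos h2]
        show List.replicate (w + 1 - 1) '0' ++ [Nat.digitChar (n % 2)] = _
        rw [pvPadBin, hdiv, pvPadBin_zero]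
        simp
      · rw [pvBinChars, dif_neg h2]
        have hlen : (pvBinChars (n / 2)).length ≤ w := by
          have hlenEq := congrArg List.length (ih (n / 2) (by omega) (by omega))
          simp [pvPadBin_length] at hlenEq
          omega
        have harith : w + 1 - (pvBinChars (n / 2) ++ [Nat.digitChar (n % 2)]).length
            = w - (pvBinChars (n / 2)).length := by simp
        rw [harith, pvPadBin, ← ih (n / 2) (by omega) (by omega)]
        simp

lemma bc_half (z : Nat) :
    PySem.Int.bitCount (z : Int) = z % 2 + PySem.Int.bitCount ((z / 2 : Nat) : Int) := by
  rcases Nat.eq_zero_or_pos z with hz | hz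
  · subst hz; decide
  · exact PySem.Int.bitCount_natCast hz

lemma xor_mod_two (a b : Nat) : (a ^^^ b) % 2 = if a % 2 = b % 2 then 0 else 1 := by
  have h0 : (a ^^^ b).testBit 0 = ((a.testBit 0) ^^ (b.testBit 0)) := Nat.testBit_xor a b 0
  simp only [Nat.testBit_zero] at h0
  have ha : a % 2 = 0 ∨ a % 2 = 1 := by omega
  have hb : b % 2 = 0 ∨ b % 2 = 1 := by omega
  have hz : (a ^^^ b) % 2 = 0 ∨ (a ^^^ b) % 2 = 1 := by omega
  rcases ha with ha | ha <;> rcases hb with hb | hb <;>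
    simp [ha, hb] at h0 ⊢ <;> omega

lemma digitChar_beq (a b : Nat) (ha : a < 2) (hb : b < 2) :
    (Nat.digitChar a == Nat.digitChar b) = decide (a = b) := by
  interval_cases a <;> interval_cases b <;> decide

-- the heart of the equivalence: equal positions + popcount of the XOR = width
lemma pvCount (w : Nat) : ∀ a b, a < 2 ^ w → b < 2 ^ w →
    ((pvPadBin w a).zip (pvPadBin w b)).countP (fun p => p.1 == p.2)
      + PySem.Int.bitCount ((a ^^^ b : Nat) : Int) = w := by
  induction w with
  | zero =>
    intro a b ha hb
    have : a = 0 ∧ b = 0 := by constructor <;> omega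
    rcases this with ⟨rfl, rfl⟩
    decide
  | succ w ih =>
    intro a b ha hb
    have hlen : (pvPadBin w (a / 2)).length = (pvPadBin w (b / 2)).length := by
      simp [pvPadBin_length]
    simp only [pvPadBin]
    rw [List.zip_append hlen, List.countP_append]
    have hxd : (a ^^^ b) / 2 = (a / 2) ^^^ (b / 2) := Nat.xor_div_two
    rw [bc_half (a ^^^ b), hxd]
    have hih := ih (a / 2) (b / 2) (by omega) (by omega)
    have hsing : List.countP (fun p => p.1 == p.2)
        ([Nat.digitChar (a % 2)].zip [Nat.digitChar (b % 2)])
        = if a % 2 = b % 2 then 1 else 0 := by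
      simp [List.countP_cons, digitChar_beq (a % 2) (b % 2) (by omega) (by omega)]
    rw [hsing, xor_mod_two]
    by_cases h : a % 2 = b % 2
    · rw [if_pos h, if_pos h]; omega
    · rw [if_neg h, if_neg h]; omega

lemma parse_nonempty (s : String) (x : Int)
    (h : PySem.Int.ofStrBase? s 16 = some x) : 1 ≤ s.length := by
  by_contra hlen
  have h0 : s.toList.length = 0 := by
    have := s.length_toList
    omega
  have : s.toList = [] := List.length_eq_zero_iff.mp h0
  rw [PySem.Int.ofStrBase?, this] at h
  have hnone : PySem.Int.ofCharsBase? ([] : List Char) 16 = none := by decide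
  rw [hnone] at h
  cases h

-- A's binary string for a nonnegative parse is the (4·len)-bit rendering of the value
lemma hex_to_binary_eq (h : String) (x : Int)
    (hp : PySem.Int.ofStrBase? h 16 = some x) (hx : 0 ≤ x)
    (hb : x.natAbs < 16 ^ h.length) :
    hex_to_binary h = some (pvPadBin (h.length * 4) x.toNat) := by
  have hw1 : 1 ≤ h.length := parse_nonempty h x hp
  have hxlt : x.toNat < 2 ^ (h.length * 4) := by
    have : (16 : Nat) ^ h.length = 2 ^ (h.length * 4) := by
      rw [show (16 : Nat) = 2 ^ 4 by norm_num, ← pow_mul, Nat.mul_comm]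
    rw [← this]
    omega
  unfold hex_to_binary
  rw [hp]
  simp only [Option.map_some, Option.some.injEq]
  have hneg : ¬ x < 0 := by omega
  unfold PySem.Int.toBinChars0b
  rw [if_neg hneg]
  rw [PySem.List.slice_from _ (show (0 : Int) ≤ 2 by norm_num)]
  show PySem.Chars.zfill (List.drop 2 ('0' :: 'b' :: Nat.toDigits 2 x.toNat)) _ = _
  simp only [List.drop]
  rw [toDigits_two]
  have hlenle : (pvBinChars x.toNat).length ≤ h.length * 4 := by
    have := pvZP (h.length * 4) x.toNat hxlt (by omega)
    have hlenEq := congrArg List.length this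
    simp [pvPadBin_length] at hlenEq
    omega
  rw [zfill_pad _ _ (pvBinChars_ne_nil _) (pvBinChars_mem _) hlenle]
  exact pvZP (h.length * 4) x.toNat hxlt (by omega)

-- ===== VERDICT (by name: the statement is the Claim_ definition above) =====
theorem count_same_bits_spec : Claim_equal_count_same_bits := by
  intro hex1 hex2 _ hpre
  rcases hpre with ⟨hlen, hs1, hs2, hn1, hn2, hb1, hb2⟩
  rcases Option.isSome_iff_exists.mp hs1 with ⟨x, hx⟩
  rcases Option.isSome_iff_exists.mp hs2 with ⟨y, hy⟩
  rw [hx] at hb1 hn1; rw [hy] at hb2 hn2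
  simp only [Option.getD_some] at hb1 hb2 hn1 hn2
  have hxnn : ¬ x < 0 := by omega
  have hynn : ¬ y < 0 := by omega
  show count_same_bits hex1 hex2 = count_same_bits_alt hex1 hex2
  unfold count_same_bits count_same_bits_alt
  have hL : ¬ hex1.length ≠ hex2.length := by omega
  rw [hex_to_binary_eq hex1 x hx (by omega) hb1,
      hex_to_binary_eq hex2 y hy (by omega) (hlen ▸ hb2), hx, hy]
  simp only [if_neg hL, PySem.List.foldl_if_add_one,
    PySem.Int.bxor_of_nonneg (show (0:Int) ≤ x by omega) (show (0:Int) ≤ y by omega)]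
  have hcount := pvCount (hex1.length * 4) x.toNat y.toNat
    (by
      have : (16 : Nat) ^ hex1.length = 2 ^ (hex1.length * 4) := by
        rw [show (16 : Nat) = 2 ^ 4 by norm_num, ← pow_mul, Nat.mul_comm]
      omega)
    (by
      have : (16 : Nat) ^ hex1.length = 2 ^ (hex1.length * 4) := by
        rw [show (16 : Nat) = 2 ^ 4 by norm_num, ← pow_mul, Nat.mul_comm]
      rw [hlen] at *
      omega)
  rw [hlen] at hcount ⊢
  refine Prod.ext ?_ ?_
  · simp only
    omega
  · simp only [pvPadBin_length]
    omega
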